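-- pv_equiv track=rewrite | github.com/yustero/csb | programs/landscape_of_epithelial_mesenchymal_paper/boolean_formalism_kushal.py | issteady
-- ===== SOURCE A (Python) =====
-- def update(state, link_matrix, pos):
--
--     n=len(state)
--     updatepos=0
--     summ=0
--
--     for i in range (0,n):
--         summ+=(link_matrix[i][pos])*(state[i])
--
--     if summ>0:
--         updatepos=1
--     elif summ<0 :
--         updatepos=-1
--     elif summ ==0:
--         updatepos=state[pos]
--
--     return updatepos
--
-- def issteady(state, link_matrix):
--
--     n=len(state)
--     check=0
--
--     for i in range(0,n):
--
--         if state[i]!=update(state, link_matrix, i):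
--             check+=1
--             break
--
--     if check==0:
--         return True
--     else:
--         return False
-- ===== SOURCE B (Python) =====
-- def issteady(state, link_matrix):
--     n = len(state)
--     sums = [0] * n
--     for i in range(n):
--         si = state[i]
--         row = link_matrix[i]
--         sums = [sums[j] + row[j] * si for j in range(n)]
--     for k in range(n):
--         s = sums[k]
--         target = 1 if s > 0 else (-1 if s < 0 else state[k])
--         if target != state[k]:
--             return False
--     return True
-- ===== Notes on version B (the rewrite author's own statement) =====
-- stated objective: alternative
-- what changed: B computes all column sums in one row-major matrix-vector pass and then verifies each node against its sign-update in a second pass, instead of A's per-node column scan through the update helper with an early break.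
-- outside the precondition, e.g. on issteady([1, 1], [[-1], [-1]]): A returns False, B raises IndexError
import Mathlib
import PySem

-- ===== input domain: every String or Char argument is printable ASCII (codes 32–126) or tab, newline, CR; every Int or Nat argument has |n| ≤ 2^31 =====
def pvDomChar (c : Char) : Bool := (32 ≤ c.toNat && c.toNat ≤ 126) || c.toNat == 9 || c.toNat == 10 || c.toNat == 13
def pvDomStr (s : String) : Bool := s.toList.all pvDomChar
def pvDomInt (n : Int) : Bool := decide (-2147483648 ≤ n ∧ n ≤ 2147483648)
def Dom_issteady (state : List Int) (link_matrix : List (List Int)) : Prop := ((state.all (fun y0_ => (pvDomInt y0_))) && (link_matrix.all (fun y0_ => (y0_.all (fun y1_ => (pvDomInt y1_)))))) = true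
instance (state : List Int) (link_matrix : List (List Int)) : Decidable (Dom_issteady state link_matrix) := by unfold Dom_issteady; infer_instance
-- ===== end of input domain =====

-- B replaces A's per-node column scan (helper `update` called once per node, with an early
-- break) by one row-major matrix-vector pass building all column sums, then a verification
-- pass; objective: alternative decomposition, same O(n^2) cost.

-- ===== PORT A =====
-- indexing via pyGetD: exact on Pre_ (all indices in range; Python raises outside, excluded by Pre_)
def pvUpdate (state : List Int) (link_matrix : List (List Int)) (pos : Int) : Int :=
  let n : Int := state.length
  let summ : Int := (PySem.List.pyRange 0 n 1).foldl
    (fun summ i =>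
      summ + (PySem.List.pyGetD (PySem.List.pyGetD link_matrix i []) pos 0) * (PySem.List.pyGetD state i 0)) 0
  if summ > 0 then 1
  else if summ < 0 then -1
  else if summ = 0 then PySem.List.pyGetD state pos 0
  else 0

-- the `for` loop with `break`: stops at the first mismatch, returning check+1
def pvLoopA (state : List Int) (link_matrix : List (List Int)) : List Int → Int → Int
  | [], check => check
  | i :: rest, check =>
      if PySem.List.pyGetD state i 0 ≠ pvUpdate state link_matrix i then check + 1
      else pvLoopA state link_matrix rest check

def issteady (state : List Int) (link_matrix : List (List Int)) : Bool :=
  let n : Int := state.length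
  let check := pvLoopA state link_matrix (PySem.List.pyRange 0 n 1) 0
  if check == 0 then true else false

-- ===== PORT B =====
-- second pass of Source B: early `return False` on the first mismatch
def pvCheckB (state : List Int) (sums : List Int) : List Int → Bool
  | [] => true
  | k :: rest =>
      let s := PySem.List.pyGetD sums k 0
      let target := if s > 0 then 1 else if s < 0 then -1 else PySem.List.pyGetD state k 0
      if target ≠ PySem.List.pyGetD state k 0 then false else pvCheckB state sums rest

def issteady_alt (state : List Int) (link_matrix : List (List Int)) : Bool :=
  let n : Int := state.length
  let sums : List Int := (PySem.List.pyRange 0 n 1).foldl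
    (fun sums i =>
      let si := PySem.List.pyGetD state i 0
      let row := PySem.List.pyGetD link_matrix i []
      (PySem.List.pyRange 0 n 1).map (fun j => PySem.List.pyGetD sums j 0 + PySem.List.pyGetD row j 0 * si))
    (List.replicate state.length 0)
  pvCheckB state sums (PySem.List.pyRange 0 n 1)

-- ===== PRECONDITION & SPEC =====
-- Pre_ excludes exactly the shapes on which Python A can raise IndexError (fewer rows than
-- nodes, or a reached row shorter than the state); A still returns on some of these when its
-- loop breaks at an early mismatch before touching the missing entry — B raises there.
def Pre_issteady (state : List Int) (link_matrix : List (List Int)) : Prop :=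
  state.length ≤ link_matrix.length ∧
  ∀ row ∈ link_matrix.take state.length, state.length ≤ row.length
instance (state : List Int) (link_matrix : List (List Int)) : Decidable (Pre_issteady state link_matrix) := by unfold Pre_issteady; infer_instance
def pvWitness_issteady : List Int × List (List Int) := ([1, -1], [[1, 0], [0, 1]])

def Spec_issteady (state : List Int) (link_matrix : List (List Int)) (out : Bool) : Prop := out = issteady_alt state link_matrix
instance (state : List Int) (link_matrix : List (List Int)) (out : Bool) : Decidable (Spec_issteady state link_matrix out) := by unfold Spec_issteady; infer_instance

-- ===== CLAIM (what is proved, stated in full; the proofs are below) =====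
def Claim_equal_issteady : Prop := ∀ (state : List Int) (link_matrix : List (List Int)), Dom_issteady state link_matrix → Pre_issteady state link_matrix → Spec_issteady state link_matrix (issteady state link_matrix)

-- ===== LEMMAS AND PROOFS =====

-- reading entry j of a table built as a map over the range
lemma pvGetMapRange (g : Int → Int) {n j : Int} (hj : j ∈ PySem.List.pyRange 0 n 1) :
    PySem.List.pyGetD ((PySem.List.pyRange 0 n 1).map g) j 0 = g j := by
  obtain ⟨h0, h1⟩ := PySem.List.mem_pyRange_one.mp hj
  have hn : n = ((n.toNat : Nat) : Int) := by omega
  have hjj : j = ((j.toNat : Nat) : Int) := by omega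
  rw [hn, hjj]
  exact PySem.List.pyGetD_map_pyRange g n.toNat j.toNat 0 (by omega)

-- the column sum pvUpdate computes at position pos
def pvColSum (state : List Int) (link_matrix : List (List Int)) (pos : Int) : Int :=
  (PySem.List.pyRange 0 (state.length : Int) 1).foldl
    (fun summ i =>
      summ + (PySem.List.pyGetD (PySem.List.pyGetD link_matrix i []) pos 0) * (PySem.List.pyGetD state i 0)) 0

-- invariant of B's outer fold: starting from a table (map g over the range), the fold yields
-- the table whose entry j accumulates the same products over the processed rows
lemma pvSumsFold (state : List Int) (link_matrix : List (List Int)) (n : Int)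
    (L : List Int) (g : Int → Int) :
    L.foldl
      (fun sums i =>
        (PySem.List.pyRange 0 n 1).map (fun j =>
          PySem.List.pyGetD sums j 0 +
            PySem.List.pyGetD (PySem.List.pyGetD link_matrix i []) j 0 * PySem.List.pyGetD state i 0))
      ((PySem.List.pyRange 0 n 1).map g)
    = (PySem.List.pyRange 0 n 1).map (fun j =>
        L.foldl
          (fun summ i =>
            summ + (PySem.List.pyGetD (PySem.List.pyGetD link_matrix i []) j 0) * (PySem.List.pyGetD state i 0))
          (g j)) := by
  induction L generalizing g with
  | nil => simp
  | cons i L ih =>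
      simp only [List.foldl_cons]
      rw [List.map_congr_left (f := fun j =>
            PySem.List.pyGetD ((PySem.List.pyRange 0 n 1).map g) j 0 +
              PySem.List.pyGetD (PySem.List.pyGetD link_matrix i []) j 0 * PySem.List.pyGetD state i 0)
          (g := fun j => g j +
              PySem.List.pyGetD (PySem.List.pyGetD link_matrix i []) j 0 * PySem.List.pyGetD state i 0)
          (by intro j hj; simp only []; rw [pvGetMapRange g hj])]
      exact ih _

-- both loops agree when every entry of sums carries the right column sum
lemma pvLoopsAgree (state : List Int) (link_matrix : List (List Int)) (sums : List Int)
    (L : List Int)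
    (h : ∀ k ∈ L, PySem.List.pyGetD sums k 0 = pvColSum state link_matrix k) :
    (if pvLoopA state link_matrix L 0 == 0 then true else false) = pvCheckB state sums L := by
  induction L with
  | nil => simp [pvLoopA, pvCheckB]
  | cons k L ih =>
      have hk := h k (by simp)
      have hrest : ∀ k' ∈ L, PySem.List.pyGetD sums k' 0 = pvColSum state link_matrix k' := by
        intro k' hk'; exact h k' (by simp [hk'])
      have hupd : pvUpdate state link_matrix k =
          (if pvColSum state link_matrix k > 0 then 1
           else if pvColSum state link_matrix k < 0 then -1
           else PySem.List.pyGetD state k 0) := by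
        simp only [pvUpdate, pvColSum]
        split_ifs with h1 h2 h3 <;> first | rfl | omega
      simp only [pvLoopA, pvCheckB, hk, ← hupd]
      by_cases hm : PySem.List.pyGetD state k 0 = pvUpdate state link_matrix k
      · simp only [hm, ne_eq, not_true_eq_false, if_false]
        simpa using ih hrest
      · simp [hm, Ne.symm hm]

-- ===== VERDICT (by name: the statement is the Claim_ definition above) =====
theorem issteady_spec : Claim_equal_issteady := by
  intro state link_matrix _ _
  unfold Spec_issteady issteady issteady_alt
  dsimp only
  have hrepl : List.replicate state.length (0 : Int)
      = (PySem.List.pyRange 0 (state.length : Int) 1).map (fun _ => (0 : Int)) := by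
    rw [List.map_const', PySem.List.length_pyRange_one]
    simp
  rw [hrepl, pvSumsFold]
  exact pvLoopsAgree state link_matrix _ _ (by
    intro k hk
    rw [pvGetMapRange _ hk]
    rfl)
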